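-- pv_equiv track=rewrite | github.com/iamarnath/Leetcode-js | blind-75-Java/SegmentTree/RangeMaximumIndexQuery.py | range_max_index_query
-- ===== SOURCE A (Python) =====
-- def build_segment_tree(i,l,r,segment_tree,arr):
-- 	if l==r:
-- 		segment_tree[i] = l
-- 		return
-- 	mid = (l+r) //2
-- 	build_segment_tree(2*i+1,l,mid,segment_tree,arr)
-- 	build_segment_tree(2*i+2,mid+1,r,segment_tree,arr)
-- 	left_index = segment_tree[2*i+1]
-- 	right_index = segment_tree[2*i+2]
-- 	segment_tree[i] = left_index if arr[left_index] >= arr[right_index] else right_index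
--
-- def query_segment_tree(start,end,i,l,r,segment_tree,arr):
-- 	if l> end or r < start:
-- 		return -1 # out of bounds
-- 	if l>=start and r<= end:
-- 		return segment_tree[i]
-- 	mid = (l+r) //2
-- 	left_index = query_segment_tree(start,end,2*i+1,l,mid,segment_tree,arr)
-- 	right_index = query_segment_tree(start,end,2*i+2,mid+1,r,segment_tree,arr)
-- 	if left_index == -1:
-- 		return right_index
-- 	if right_index == -1:
-- 		return left_index
-- 	return left_index if arr[left_index] >= arr[right_index] else right_index
--
-- def construct_st(arr,n):
-- 	segment_tree = [float('inf')] * (4 * n)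
-- 	build_segment_tree(0,0,n-1,segment_tree,arr)
-- 	return segment_tree
--
-- def rmq(st,arr,n,a,b):
-- 	return query_segment_tree(a,b,0,0,n-1,st,arr)
--
-- def range_max_index_query(arr,queries):
--     n = len(arr)
--     segment_tree = construct_st(arr,n)
--     result = []
--     for query in queries:
--         a,b = query
--         idx = rmq(segment_tree,arr,n,a,b)
--         result.append(idx)
--     return result
-- ===== SOURCE B (Python) =====
-- def _leftmost_max_index(arr, a, b):
--     # leftmost index of the maximum of arr[lo..hi], the query range clipped to the array; -1 if empty
--     n = len(arr)
--     lo = a if a > 0 else 0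
--     hi = b if b < n - 1 else n - 1
--     if lo > hi:
--         return -1
--     best = lo
--     for i in range(lo + 1, hi + 1):
--         if arr[i] > arr[best]:
--             best = i
--     return best
--
-- def range_max_index_query(arr, queries):
--     return [_leftmost_max_index(arr, a, b) for a, b in queries]
-- ===== Notes on version B (the rewrite author's own statement) =====
-- stated objective: simpler
-- what changed: Replaces the recursive segment tree (4n-node recursive build plus recursive range queries) by a direct per-query left-to-right scan keeping the leftmost maximum index of the clipped range; no tree is built at all.
import Mathlib
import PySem

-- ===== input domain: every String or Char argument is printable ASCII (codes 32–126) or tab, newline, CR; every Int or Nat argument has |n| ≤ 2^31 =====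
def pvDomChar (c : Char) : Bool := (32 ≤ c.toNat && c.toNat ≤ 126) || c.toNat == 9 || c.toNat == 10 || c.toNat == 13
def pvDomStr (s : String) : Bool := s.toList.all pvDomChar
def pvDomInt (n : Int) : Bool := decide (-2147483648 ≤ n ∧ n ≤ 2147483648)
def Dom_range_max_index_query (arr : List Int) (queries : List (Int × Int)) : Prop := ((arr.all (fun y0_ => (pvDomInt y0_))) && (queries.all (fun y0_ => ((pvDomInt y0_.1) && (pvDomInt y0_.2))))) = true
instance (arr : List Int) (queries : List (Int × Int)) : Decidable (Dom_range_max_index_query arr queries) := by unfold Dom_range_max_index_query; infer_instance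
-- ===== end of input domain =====

-- B replaces A's segment tree by a direct per-query leftmost-argmax scan of the clipped range: simpler, no tree (equivalence of RETURN values; A also allocates a scratch list internally, B does not).

-- ===== PORT A =====
-- The Python segment_tree is a mutable list written before any slot is read; it is
-- modeled as a total function Int → Int updated pointwise (the float('inf') sentinel
-- of unwritten slots is never read when arr ≠ [], so the default 0 is never observed).
-- Python recursion is given fuel arr.length + 1 (≥ the recursion depth whenever arr ≠ [];
-- on arr = [] Python recurses forever — excluded by Pre_).
def buildST (arr : List Int) : Nat → Int → Int → Int → (Int → Int) → (Int → Int)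
  | 0, _, _, _, st => st
  | fuel+1, i, l, r, st =>
    if l = r then (fun j => if j = i then l else st j)
    else
      let mid := PySem.Int.floordiv (l + r) 2
      let st1 := buildST arr fuel (2*i+1) l mid st
      let st2 := buildST arr fuel (2*i+2) (mid+1) r st1
      let li := st2 (2*i+1)
      let ri := st2 (2*i+2)
      let v := if PySem.List.pyGetD arr li 0 ≥ PySem.List.pyGetD arr ri 0 then li else ri
      fun j => if j = i then v else st2 j

def queryST (arr : List Int) : Nat → Int → Int → Int → Int → Int → (Int → Int) → Int
  | 0, _, _, _, _, _, _ => -1   -- fuel exhausted: unreachable when arr ≠ []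
  | fuel+1, start, stop, i, l, r, st =>
    if l > stop ∨ r < start then -1
    else if l ≥ start ∧ r ≤ stop then st i
    else
      let mid := PySem.Int.floordiv (l + r) 2
      let li := queryST arr fuel start stop (2*i+1) l mid st
      let ri := queryST arr fuel start stop (2*i+2) (mid+1) r st
      if li = -1 then ri
      else if ri = -1 then li
      else if PySem.List.pyGetD arr li 0 ≥ PySem.List.pyGetD arr ri 0 then li else ri

def range_max_index_query (arr : List Int) (queries : List (Int × Int)) : List Int :=
  let n : Int := arr.length
  let st := buildST arr (arr.length + 1) 0 0 (n - 1) (fun _ => 0)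
  queries.foldl (fun result q => result ++ [queryST arr (arr.length + 1) q.1 q.2 0 0 (n - 1) st]) []

-- ===== PORT B =====
def leftmostMaxIndex (arr : List Int) (a b : Int) : Int :=
  let n : Int := arr.length
  let lo := if a > 0 then a else 0
  let hi := if b < n - 1 then b else n - 1
  if lo > hi then -1
  else (PySem.List.pyRange (lo + 1) (hi + 1) 1).foldl
        (fun best i => if PySem.List.pyGetD arr i 0 > PySem.List.pyGetD arr best 0 then i else best) lo

def range_max_index_query_alt (arr : List Int) (queries : List (Int × Int)) : List Int :=
  queries.map (fun q => leftmostMaxIndex arr q.1 q.2)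

-- ===== PRECONDITION & SPEC =====
-- Pre_ excludes only arr = [], on which A recurses forever (RecursionError); A returns on everything else.
def Pre_range_max_index_query (arr : List Int) (queries : List (Int × Int)) : Prop := arr ≠ []
instance (arr : List Int) (queries : List (Int × Int)) : Decidable (Pre_range_max_index_query arr queries) := by unfold Pre_range_max_index_query; infer_instance
def pvWitness_range_max_index_query : List Int × (List (Int × Int)) := ([3, 1, 3], [(0, 2), (1, 2), (-1, 5), (2, 1)])

def Spec_range_max_index_query (arr : List Int) (queries : List (Int × Int)) (out : List Int) : Prop := out = range_max_index_query_alt arr queries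
instance (arr : List Int) (queries : List (Int × Int)) (out : List Int) : Decidable (Spec_range_max_index_query arr queries out) := by unfold Spec_range_max_index_query; infer_instance

-- ===== CLAIM (what is proved, stated in full; the proofs are below) =====
def Claim_equal_range_max_index_query : Prop := ∀ (arr : List Int) (queries : List (Int × Int)), Dom_range_max_index_query arr queries → Pre_range_max_index_query arr queries → Spec_range_max_index_query arr queries (range_max_index_query arr queries)

-- ===== LEMMAS AND PROOFS =====

-- the left-favouring combine (A's '>=' tie-break) and the leftmost-argmax of arr[l..r]
def combineIdx (arr : List Int) (x y : Int) : Int :=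
  if PySem.List.pyGetD arr x 0 ≥ PySem.List.pyGetD arr y 0 then x else y

def bestIdx (arr : List Int) (l r : Int) : Int :=
  (PySem.List.pyRange (l + 1) (r + 1) 1).foldl (combineIdx arr) l

-- heap-index reachability: k is in the subtree of node j (j itself included)
def pvInS (j k : Int) : Prop := ∃ d : Nat, 2 ^ d * (j + 1) ≤ k + 1 ∧ k + 1 < 2 ^ d * (j + 2)

lemma pvInS_self (j : Int) : pvInS j j := ⟨0, by norm_num⟩

lemma pvInS_left {j k : Int} (h : pvInS (2*j+1) k) : pvInS j k := by
  obtain ⟨d, h1, h2⟩ := h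
  have hp : (0:Int) < 2 ^ d := pow_pos (by norm_num) d
  refine ⟨d + 1, ?_, ?_⟩ <;>
    (rw [pow_succ]; ring_nf; ring_nf at h1 h2; linarith)

lemma pvInS_right {j k : Int} (h : pvInS (2*j+2) k) : pvInS j k := by
  obtain ⟨d, h1, h2⟩ := h
  have hp : (0:Int) < 2 ^ d := pow_pos (by norm_num) d
  refine ⟨d + 1, ?_, ?_⟩ <;>
    (rw [pow_succ]; ring_nf; ring_nf at h1 h2; linarith)

lemma pvInS_ge {j k : Int} (hj : 0 ≤ j) (h : pvInS j k) : j ≤ k := by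
  obtain ⟨d, h1, _⟩ := h
  have hp : (1:Int) ≤ 2 ^ d := one_le_pow₀ (by norm_num)
  nlinarith

lemma pvInS_disjoint {j k : Int} (hj : 0 ≤ j) (h1 : pvInS (2*j+1) k) (h2 : pvInS (2*j+2) k) : False := by
  obtain ⟨d1, a1, b1⟩ := h1
  obtain ⟨d2, a2, b2⟩ := h2
  rcases le_or_gt d1 d2 with hd | hd
  · have hmono : (2:Int) ^ d1 ≤ 2 ^ d2 := pow_le_pow_right₀ (by norm_num) hd
    have := mul_le_mul_of_nonneg_right hmono (show (0:Int) ≤ 2*j+1+2 by omega)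
    linarith
  · have hd' : d2 + 1 ≤ d1 := hd
    have hmono : (2:Int) ^ (d2+1) ≤ 2 ^ d1 := pow_le_pow_right₀ (by norm_num) hd'
    rw [pow_succ] at hmono
    have hp2 : (0:Int) < 2 ^ d2 := pow_pos (by norm_num) d2
    have h3 := mul_le_mul_of_nonneg_right hmono (show (0:Int) ≤ 2*j+1+1 by omega)
    nlinarith

lemma buildST_preserve (arr : List Int) : ∀ (fuel : Nat) (i l r : Int) (st : Int → Int) (k : Int),
    ¬ pvInS i k → buildST arr fuel i l r st k = st k := by
  intro fuel
  induction fuel with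
  | zero => intro i l r st k _; rfl
  | succ f ih =>
    intro i l r st k hk
    have hki : k ≠ i := fun h => hk (h ▸ pvInS_self i)
    have hL : ¬ pvInS (2*i+1) k := fun h => hk (pvInS_left h)
    have hR : ¬ pvInS (2*i+2) k := fun h => hk (pvInS_right h)
    simp only [buildST]
    split
    · simp only [if_neg hki]
    · simp only [if_neg hki]
      rw [ih _ _ _ _ _ hR, ih _ _ _ _ _ hL]

-- the built-tree invariant, shaped like the build recursion
def GoodST (arr : List Int) : Nat → Int → Int → Int → (Int → Int) → Prop
  | 0, _, _, _, _ => False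
  | fuel+1, i, l, r, st =>
    st i = bestIdx arr l r ∧
    (l = r ∨
      (GoodST arr fuel (2*i+1) l (PySem.Int.floordiv (l + r) 2) st ∧
       GoodST arr fuel (2*i+2) (PySem.Int.floordiv (l + r) 2 + 1) r st))

lemma GoodST_head {arr : List Int} {fuel : Nat} {i l r : Int} {st : Int → Int}
    (h : GoodST arr fuel i l r st) : st i = bestIdx arr l r := by
  cases fuel with
  | zero => exact absurd h (by simp [GoodST])
  | succ f => exact h.1

lemma GoodST_congr (arr : List Int) : ∀ (fuel : Nat) (j l r : Int) (st st' : Int → Int),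
    GoodST arr fuel j l r st → (∀ k, pvInS j k → st' k = st k) → GoodST arr fuel j l r st' := by
  intro fuel
  induction fuel with
  | zero => intro j l r st st' h _; exact absurd h (by simp [GoodST])
  | succ f ih =>
    intro j l r st st' h hagree
    obtain ⟨h1, h2⟩ := h
    refine ⟨by rw [hagree j (pvInS_self j)]; exact h1, ?_⟩
    rcases h2 with h2 | ⟨hL, hR⟩
    · exact Or.inl h2
    · exact Or.inr ⟨ih _ _ _ _ _ hL (fun k hk => hagree k (pvInS_left hk)),
                    ih _ _ _ _ _ hR (fun k hk => hagree k (pvInS_right hk))⟩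

lemma bestIdx_single (arr : List Int) (l : Int) : bestIdx arr l l = l := by
  simp [bestIdx, PySem.List.pyRange_one_eq_nil (le_refl (l + 1))]

lemma combineIdx_assoc (arr : List Int) (x y z : Int) :
    combineIdx arr (combineIdx arr x y) z = combineIdx arr x (combineIdx arr y z) := by
  simp only [combineIdx]
  split_ifs <;> first | rfl | omega

lemma foldl_combineIdx (arr : List Int) : ∀ (ys : List Int) (x y : Int),
    List.foldl (combineIdx arr) (combineIdx arr x y) ys = combineIdx arr x (List.foldl (combineIdx arr) y ys) := by
  intro ys
  induction ys with
  | nil => intro x y; rfl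
  | cons z zs ih =>
    intro x y
    simp only [List.foldl_cons]
    rw [combineIdx_assoc, ih]

lemma bestIdx_split (arr : List Int) {l mid r : Int} (h1 : l ≤ mid) (h2 : mid < r) :
    bestIdx arr l r = combineIdx arr (bestIdx arr l mid) (bestIdx arr (mid + 1) r) := by
  unfold bestIdx
  rw [PySem.List.pyRange_one_append (l + 1) (mid + 1) (r + 1) (by omega) (by omega),
      List.foldl_append, PySem.List.pyRange_one_cons (by omega : mid + 1 < r + 1),
      List.foldl_cons, foldl_combineIdx]

lemma le_bestIdx (arr : List Int) {l r : Int} : l ≤ bestIdx arr l r := by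
  unfold bestIdx
  have key : ∀ (ys : List Int) (x : Int), l ≤ x → (∀ y ∈ ys, l ≤ y) →
      l ≤ List.foldl (combineIdx arr) x ys := by
    intro ys
    induction ys with
    | nil => intro x hx _; exact hx
    | cons z zs ih =>
      intro x hx hys
      simp only [List.foldl_cons]
      refine ih _ ?_ (fun y hy => hys y (List.mem_cons_of_mem _ hy))
      have hz : l ≤ z := hys z (by simp)
      unfold combineIdx
      split
      · exact hx
      · exact hz
  refine key _ _ le_rfl ?_
  intro y hy
  have := (PySem.List.mem_pyRange_one).1 hy
  omega

lemma buildST_good (arr : List Int) : ∀ (fuel : Nat) (i l r : Int) (st : Int → Int),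
    0 ≤ i → 0 ≤ l → l ≤ r → (r - l).toNat < fuel →
    GoodST arr fuel i l r (buildST arr fuel i l r st) := by
  intro fuel
  induction fuel with
  | zero => intro i l r st _ _ _ h; omega
  | succ f ih =>
    intro i l r st hi hl hlr hfuel
    by_cases heq : l = r
    · subst heq
      simp only [buildST, GoodST]
      exact ⟨by simp [bestIdx_single], by simp⟩
    · have hlt : l < r := lt_of_le_of_ne hlr heq
      have hmid1 : l ≤ PySem.Int.floordiv (l + r) 2 :=
        (PySem.Int.floordiv_two_mid_bounds hlr).1
      have hmid2 : PySem.Int.floordiv (l + r) 2 < r := by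
        rw [PySem.Int.floordiv_lt_iff_lt_mul (by norm_num)]
        omega
      set mid := PySem.Int.floordiv (l + r) 2 with hmid
      -- the two recursive builds
      set st1 := buildST arr f (2*i+1) l mid st with hst1
      set st2 := buildST arr f (2*i+2) (mid+1) r st1 with hst2
      have gL : GoodST arr f (2*i+1) l mid st1 := ih _ _ _ _ (by omega) hl hmid1 (by omega)
      have gR : GoodST arr f (2*i+2) (mid+1) r st2 := ih _ _ _ _ (by omega) (by omega) (by omega) (by omega)
      have gL2 : GoodST arr f (2*i+1) l mid st2 :=
        GoodST_congr arr f _ _ _ _ _ gL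
          (fun k hk => buildST_preserve arr f _ _ _ _ k (fun h2 => pvInS_disjoint hi hk h2))
      have hL2 : st2 (2*i+1) = bestIdx arr l mid := GoodST_head gL2
      have hR2 : st2 (2*i+2) = bestIdx arr (mid+1) r := GoodST_head gR
      have hne1 : ∀ k, pvInS (2*i+1) k → k ≠ i := by
        intro k hk; have := pvInS_ge (by omega) hk; omega
      have hne2 : ∀ k, pvInS (2*i+2) k → k ≠ i := by
        intro k hk; have := pvInS_ge (by omega) hk; omega
      simp only [buildST, if_neg heq, GoodST]
      rw [← hmid, ← hst1, ← hst2]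
      constructor
      · simp only [hL2, hR2]
        rw [bestIdx_split arr hmid1 hmid2]
        rfl
      · refine Or.inr ⟨GoodST_congr arr f _ _ _ _ _ gL2 (fun k hk => by simp [hne1 k hk]), 
                        GoodST_congr arr f _ _ _ _ _ gR (fun k hk => by simp [hne2 k hk])⟩

-- what the segment-tree query computes on a Good tree: leftmost argmax of the clipped range
lemma queryST_spec (arr : List Int) : ∀ (fuel : Nat) (i l r start stop : Int) (st : Int → Int),
    0 ≤ l → l ≤ r → GoodST arr fuel i l r st →
    queryST arr fuel start stop i l r st =
      (if max start l > min stop r then -1 else bestIdx arr (max start l) (min stop r)) := by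
  intro fuel
  induction fuel with
  | zero => intro i l r start stop st _ _ h; exact absurd h (by simp [GoodST])
  | succ f ih =>
    intro i l r start stop st hl hlr hg
    obtain ⟨hhead, hrest⟩ := hg
    simp only [queryST]
    by_cases hout : l > stop ∨ r < start
    · rw [if_pos hout, if_pos (by omega)]
    · rw [if_neg hout]
      simp only [not_or, not_lt] at hout
      by_cases hcov : l ≥ start ∧ r ≤ stop
      · rw [if_pos hcov]
        have h1 : max start l = l := by omega
        have h2 : min stop r = r := by omega
        rw [h1, h2, if_neg (by omega)]
        exact hhead
      · rw [if_neg hcov]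
        -- not covered: l < r (else covered), children are Good
        have hlt : l < r := by
          rcases eq_or_lt_of_le hlr with h | h
          · exfalso; exact hcov ⟨by omega, by omega⟩
          · exact h
        rcases hrest with h | ⟨gL, gR⟩
        · omega
        · have hmid1 : l ≤ PySem.Int.floordiv (l + r) 2 :=
            (PySem.Int.floordiv_two_mid_bounds hlr).1
          have hmid2 : PySem.Int.floordiv (l + r) 2 < r := by
            rw [PySem.Int.floordiv_lt_iff_lt_mul (by norm_num)]
            omega
          set mid := PySem.Int.floordiv (l + r) 2 with hmid
          clear_value mid
          rw [ih _ _ _ _ _ _ hl hmid1 gL, ih _ _ _ _ _ _ (by omega) (by omega) gR]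
          by_cases hLe : max start l > min stop mid
          · -- left empty
            rw [if_pos hLe]
            simp only [reduceIte]
            by_cases hRe : max start (mid+1) > min stop r
            · have hT : max start l > min stop r := by omega
              rw [if_pos hRe, if_pos hT]
            · rw [if_neg hRe]
              have heq : max start l = max start (mid+1) := by omega
              have hT : ¬ (max start l > min stop r) := by omega
              rw [if_neg hT, heq]
          · rw [if_neg hLe]
            have hLge : 0 ≤ bestIdx arr (max start l) (min stop mid) :=
              le_trans (by omega) (le_bestIdx arr)
            have hLne : ¬ (bestIdx arr (max start l) (min stop mid) = -1) := by omega
            rw [if_neg hLne]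
            by_cases hRe : max start (mid+1) > min stop r
            · -- right empty
              rw [if_pos hRe]
              simp only [reduceIte]
              have h1 : min stop r = min stop mid := by omega
              have hT : ¬ (max start l > min stop r) := by omega
              rw [if_neg hT, h1]
            · rw [if_neg hRe]
              have hRge : 0 ≤ bestIdx arr (max start (mid+1)) (min stop r) :=
                le_trans (by omega) (le_bestIdx arr)
              have hRne : ¬ (bestIdx arr (max start (mid+1)) (min stop r) = -1) := by omega
              rw [if_neg hRne]
              have h1 : min stop mid = mid := by omega
              have h2 : max start (mid+1) = mid + 1 := by omega
              have h3 : max start l ≤ mid := by omega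
              have hT : ¬ (max start l > min stop r) := by omega
              rw [if_neg hT, h1, h2,
                  bestIdx_split arr h3 (by omega : mid < min stop r)]
              rfl

-- B's scan function equals combineIdx pointwise
lemma scan_eq_combine (arr : List Int) :
    (fun best i => if PySem.List.pyGetD arr i 0 > PySem.List.pyGetD arr best 0 then i else best)
      = combineIdx arr := by
  funext best i
  simp only [combineIdx]
  split_ifs <;> first | rfl | omega

-- per-query agreement
lemma per_query (arr : List Int) (h : arr ≠ []) (a b : Int) :
    queryST arr (arr.length + 1) a b 0 0 ((arr.length : Int) - 1)
        (buildST arr (arr.length + 1) 0 0 ((arr.length : Int) - 1) (fun _ => 0))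
      = leftmostMaxIndex arr a b := by
  have hn : 1 ≤ arr.length := List.length_pos_iff.2 h
  have hg : GoodST arr (arr.length + 1) 0 0 ((arr.length : Int) - 1)
      (buildST arr (arr.length + 1) 0 0 ((arr.length : Int) - 1) (fun _ => 0)) :=
    buildST_good arr _ _ _ _ _ le_rfl le_rfl (by omega) (by omega)
  rw [queryST_spec arr _ _ _ _ _ _ _ le_rfl (by omega) hg]
  unfold leftmostMaxIndex
  have hlo : (if a > 0 then a else 0) = max a 0 := by omega
  have hhi : (if b < (arr.length : Int) - 1 then b else (arr.length : Int) - 1)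
      = min b ((arr.length : Int) - 1) := by omega
  simp only [hlo, hhi, scan_eq_combine arr]
  by_cases hemp : max a 0 > min b ((arr.length : Int) - 1)
  · rw [if_pos hemp, if_pos hemp]
  · rw [if_neg hemp, if_neg hemp]
    rfl

-- ===== VERDICT (by name: the statement is the Claim_ definition above) =====
theorem range_max_index_query_spec : Claim_equal_range_max_index_query := by
  intro arr queries _ hpre
  unfold Spec_range_max_index_query range_max_index_query range_max_index_query_alt
  rw [PySem.List.foldl_append_singleton_eq_map]
  exact List.map_congr_left (fun q _ => per_query arr hpre q.1 q.2)
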